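-- pv_equiv track=rewrite | github.com/theddy9098/Actividad_Esctructura_Unidad1 | Pyth/Actividad.py | detectar_orden
-- ===== SOURCE A (Python) =====
-- def detectar_orden(arreglo) -> str:
--     asc = True
--     desc = True
--
--     for i in range(len(arreglo) - 1):
--         if arreglo[i] > arreglo[i + 1]:
--             asc = False
--         if arreglo[i] < arreglo[i + 1]:
--             desc = False
--
--     if asc:
--         return "Ascendente"
--     elif desc:
--         return "Descendente"
--     else:
--         return "Desordenado"
-- ===== SOURCE B (Python) =====
-- def detectar_orden(arreglo) -> str:
--     lista = list(arreglo)
--     if lista == sorted(lista):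
--         return "Ascendente"
--     if lista == sorted(lista, reverse=True):
--         return "Descendente"
--     return "Desordenado"
-- ===== Notes on version B (the rewrite author's own statement) =====
-- stated objective: idiomatic
-- what changed: Replaces the index loop maintaining asc/desc flags with comparisons of the list against sorted(lista) and sorted(lista, reverse=True).
import Mathlib
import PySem

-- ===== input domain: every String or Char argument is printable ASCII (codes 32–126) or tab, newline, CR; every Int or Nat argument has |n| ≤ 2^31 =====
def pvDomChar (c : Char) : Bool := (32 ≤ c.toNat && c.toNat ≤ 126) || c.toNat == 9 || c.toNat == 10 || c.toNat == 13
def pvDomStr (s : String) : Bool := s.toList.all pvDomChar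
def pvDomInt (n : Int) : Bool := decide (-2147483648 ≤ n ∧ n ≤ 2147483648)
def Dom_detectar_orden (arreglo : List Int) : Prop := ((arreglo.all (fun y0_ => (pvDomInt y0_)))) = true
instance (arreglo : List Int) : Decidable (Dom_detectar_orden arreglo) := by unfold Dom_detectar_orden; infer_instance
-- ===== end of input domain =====

-- B replaces A's single flag-maintaining index loop by comparing the list against its
-- sorted (and reverse-sorted) version; idiomatic, not faster.


-- ===== PORT A =====
-- the loop body of A: update the (asc, desc) pair at index i
def detectarStep (arreglo : List Int) (st : Bool × Bool) (i : Int) : Bool × Bool :=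
  ((if PySem.List.pyGetD arreglo i 0 > PySem.List.pyGetD arreglo (i + 1) 0 then false else st.1),
   (if PySem.List.pyGetD arreglo i 0 < PySem.List.pyGetD arreglo (i + 1) 0 then false else st.2))

def detectar_orden (arreglo : List Int) : String :=
  let r := (PySem.List.pyRange 0 ((arreglo.length : Int) - 1) 1).foldl (detectarStep arreglo) (true, true)
  if r.1 then "Ascendente"
  else if r.2 then "Descendente"
  else "Desordenado"

-- ===== PORT B =====
def detectar_orden_alt (arreglo : List Int) : String :=
  let lista := arreglo
  if lista = PySem.List.sorted lista (fun x => x) false then "Ascendente"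
  else if lista = PySem.List.sorted lista (fun x => x) true then "Descendente"
  else "Desordenado"

-- ===== PRECONDITION & SPEC =====
def Spec_detectar_orden (arreglo : List Int) (out : String) : Prop := out = detectar_orden_alt arreglo
instance (arreglo : List Int) (out : String) : Decidable (Spec_detectar_orden arreglo out) := by unfold Spec_detectar_orden; infer_instance

-- ===== CLAIM (what is proved, stated in full; the proofs are below) =====
def Claim_equal_detectar_orden : Prop := ∀ (arreglo : List Int), Dom_detectar_orden arreglo → Spec_detectar_orden arreglo (detectar_orden arreglo)

-- ===== LEMMAS AND PROOFS =====

-- shifting the index past a cons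
theorem pyGetD_cons_succ (x : Int) (l : List Int) (k : Nat) (d : Int) :
    PySem.List.pyGetD (x :: l) ((k : Int) + 1) d = PySem.List.pyGetD l (k : Int) d := by
  have : ((k : Int) + 1) = ((k + 1 : Nat) : Int) := by push_cast; ring
  rw [this, PySem.List.pyGetD_natCast, PySem.List.pyGetD_natCast]
  simp [List.getD]

-- A's loop computes the two adjacent-chain flags
theorem foldl_detectarStep (xs : List Int) (a d : Bool) :
    ((List.range (xs.length - 1)).map Int.ofNat).foldl (detectarStep xs) (a, d)
      = (a && decide (List.IsChain (· ≤ ·) xs), d && decide (List.IsChain (fun p q => q ≤ p) xs)) := by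
  induction xs generalizing a d with
  | nil => simp
  | cons x t ih =>
    cases t with
    | nil => simp
    | cons y t =>
      have hlen : (x :: y :: t).length - 1 = (y :: t).length - 1 + 1 := by
        simp only [List.length_cons]; omega
      rw [hlen, List.range_succ_eq_map]
      simp only [List.map_cons, List.foldl_cons, List.map_map]
      have hstep0 : detectarStep (x :: y :: t) (a, d) (Int.ofNat 0)
          = ((if x > y then false else a), (if x < y then false else d)) := by
        simp [detectarStep, PySem.List.pyGetD]
      have hfun : ∀ (st : Bool × Bool) (k : Nat),
          detectarStep (x :: y :: t) st (Int.ofNat (k + 1))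
            = detectarStep (y :: t) st (Int.ofNat k) := by
        intro st k
        have h1 : (Int.ofNat (k + 1)) = ((k : Int)) + 1 := by rw [Int.ofNat_eq_natCast]; push_cast; ring
        simp only [detectarStep, h1]
        rw [pyGetD_cons_succ]
        have h2 : (k : Int) + 1 + 1 = ((k + 1 : Nat) : Int) + 1 := by push_cast; ring
        rw [h2, pyGetD_cons_succ]
        have h3 : ((k + 1 : Nat) : Int) = (k : Int) + 1 := by push_cast; ring
        rw [h3]
        rfl
      have key : List.foldl (detectarStep (x :: y :: t))
            (detectarStep (x :: y :: t) (a, d) (Int.ofNat 0))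
            ((List.range ((y :: t).length - 1)).map (Int.ofNat ∘ Nat.succ))
          = ((List.range ((y :: t).length - 1)).map Int.ofNat).foldl
            (detectarStep (y :: t)) ((if x > y then false else a), (if x < y then false else d)) := by
        rw [hstep0, List.foldl_map, List.foldl_map]
        apply PySem.List.foldl_congr_mem
        intro st k _
        exact hfun st k
      rw [key, ih]
      simp only [List.isChain_cons_cons]
      rcases lt_trichotomy x y with h | h | h
      · simp [show ¬ x > y by omega, show x < y from h, show x ≤ y by omega, show ¬ y ≤ x by omega]
      · simp [show ¬ x > y by omega, show ¬ x < y by omega, show x ≤ y by omega, show y ≤ x by omega]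
      · simp [show x > y from h, show ¬ x ≤ y by omega, show y ≤ x by omega, show ¬ x < y by omega]

theorem sorted_asc_iff (xs : List Int) :
    xs = PySem.List.sorted xs (fun x => x) false ↔ List.IsChain (· ≤ ·) xs := by
  constructor
  · intro h
    have := PySem.List.sorted_pairwise xs (fun x => x) (κ := Int)
    rw [← h] at this
    exact List.Pairwise.isChain (by simpa using this)
  · intro h
    exact (PySem.List.sorted_eq_self_of_pairwise xs (fun x => x) (by simpa using List.IsChain.pairwise h)).symm

theorem sorted_desc_iff (xs : List Int) :
    xs = PySem.List.sorted xs (fun x => x) true ↔ List.IsChain (fun p q : Int => q ≤ p) xs := by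
  constructor
  · intro h
    have := PySem.List.sorted_pairwise_rev xs (fun x => x) (κ := Int)
    rw [← h] at this
    exact List.Pairwise.isChain (by simpa using this)
  · intro h
    exact (PySem.List.sorted_rev_eq_self_of_pairwise xs (fun x => x) (by simpa using List.IsChain.pairwise h)).symm

-- ===== VERDICT (by name: the statement is the Claim_ definition above) =====
theorem detectar_orden_spec : Claim_equal_detectar_orden := by
  intro xs _
  unfold Spec_detectar_orden detectar_orden detectar_orden_alt
  have hr : PySem.List.pyRange 0 ((xs.length : Int) - 1) 1
      = (List.range (xs.length - 1)).map Int.ofNat := by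
    rw [PySem.List.pyRange_one]
    have : (((xs.length : Int) - 1) - 0).toNat = xs.length - 1 := by omega
    rw [this]
    simp
  rw [hr, foldl_detectarStep]
  by_cases h1 : List.IsChain (· ≤ ·) xs <;>
    by_cases h2 : List.IsChain (fun p q : Int => q ≤ p) xs <;>
      simp [h1, h2, sorted_asc_iff, sorted_desc_iff]
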